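-- pv_equiv track=rewrite | github.com/kirill3008/c_compiler | utils.py | to_str_column
-- ===== SOURCE A (Python) =====
-- def to_str_column(data: str, index: int) -> tuple[int, int]:
--     line_index = 1
--     for line in data.split('\n'):
--         if index > len(line) + 1:
--             index -= len(line) + 1
--             line_index += 1
--             continue
--         return line_index, index + 1
--     return -1, -1
-- ===== SOURCE B (Python) =====
-- import bisect
--
-- def to_str_column(data: str, index: int) -> tuple[int, int]:
--     cum = []
--     total = 0
--     for line in data.split('\n'):
--         total += len(line) + 1
--         cum.append(total)
--     i = bisect.bisect_left(cum, index)
--     if i == len(cum):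
--         return -1, -1
--     prev = cum[i - 1] if i > 0 else 0
--     return i + 1, index - prev + 1
-- ===== Notes on version B (the rewrite author's own statement) =====
-- stated objective: alternative
-- what changed: Replaced A's running-subtraction scan over the split lines with a prefix-sum offset table built once and a bisect_left binary search that locates the line.
import Mathlib
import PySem

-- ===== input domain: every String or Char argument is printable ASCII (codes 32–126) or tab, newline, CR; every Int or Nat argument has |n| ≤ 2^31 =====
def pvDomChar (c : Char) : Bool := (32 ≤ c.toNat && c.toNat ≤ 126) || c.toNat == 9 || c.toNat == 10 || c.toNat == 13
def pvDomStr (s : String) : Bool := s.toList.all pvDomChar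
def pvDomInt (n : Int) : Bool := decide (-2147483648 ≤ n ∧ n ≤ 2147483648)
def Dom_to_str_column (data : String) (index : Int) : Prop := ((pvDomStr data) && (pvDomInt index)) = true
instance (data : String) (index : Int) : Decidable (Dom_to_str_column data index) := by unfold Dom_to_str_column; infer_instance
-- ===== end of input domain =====

-- B replaces A's running-subtraction scan over the lines by a prefix-sum offset table
-- plus a bisect_left binary search (alternative decomposition, same total cost).

-- ===== PORT A =====
-- the 'for line in data.split('\n')' loop with its mutable index/line_index state
def pvLoopA : List (List Char) → Int → Int → Int × Int
  | [], _, _ => (-1, -1)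
  | l :: rest, index, line_index =>
      if index > (l.length : Int) + 1 then
        pvLoopA rest (index - ((l.length : Int) + 1)) (line_index + 1)
      else (line_index, index + 1)

def to_str_column (data : String) (index : Int) : Int × Int :=
  pvLoopA (PySem.Chars.splitOn data.toList ['\n']) index 1

-- ===== PORT B =====
def to_str_column_alt (data : String) (index : Int) : Int × Int :=
  let st := (PySem.Chars.splitOn data.toList ['\n']).foldl
      (fun (st : Int × List Int) line =>
        (st.1 + (line.length : Int) + 1, st.2 ++ [st.1 + (line.length : Int) + 1]))
      (0, [])
  let cum := st.2
  let i := PySem.List.bisectLeft cum index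
  if i = cum.length then (-1, -1)
  else ((i : Int) + 1,
        index - (if 0 < i then PySem.List.pyGetD cum ((i : Int) - 1) 0 else 0) + 1)

-- ===== PRECONDITION & SPEC =====
def Spec_to_str_column (data : String) (index : Int) (out : Int × Int) : Prop := out = to_str_column_alt data index
instance (data : String) (index : Int) (out : Int × Int) : Decidable (Spec_to_str_column data index out) := by unfold Spec_to_str_column; infer_instance

-- ===== CLAIM (what is proved, stated in full; the proofs are below) =====
def Claim_equal_to_str_column : Prop := ∀ (data : String) (index : Int), Dom_to_str_column data index → Spec_to_str_column data index (to_str_column data index)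

-- ===== LEMMAS AND PROOFS =====

-- prefix sums of a list of (positive) increments
def pvScan : List Int → List Int
  | [] => []
  | n :: rest => n :: (pvScan rest).map (· + n)

theorem pvScan_length (lens : List Int) : (pvScan lens).length = lens.length := by
  induction lens with
  | nil => rfl
  | cons n rest ih => simp [pvScan, ih]

theorem pvScan_pos (lens : List Int) (h : ∀ n ∈ lens, 1 ≤ n) :
    ∀ x ∈ pvScan lens, 1 ≤ x := by
  induction lens with
  | nil => simp [pvScan]
  | cons n rest ih =>
      intro x hx
      simp only [pvScan, List.mem_cons, List.mem_map] at hx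
      rcases hx with rfl | ⟨y, hy, rfl⟩
      · exact h x (by simp)
      · have h1 := ih (fun m hm => h m (by simp [hm])) y hy
        have h2 := h n (by simp)
        omega

theorem pvScan_sorted (lens : List Int) (h : ∀ n ∈ lens, 1 ≤ n) :
    (pvScan lens).Pairwise (· ≤ ·) := by
  induction lens with
  | nil => simp [pvScan]
  | cons n rest ih =>
      simp only [pvScan]
      refine List.pairwise_cons.mpr ⟨?_, ?_⟩
      · intro x hx
        rcases List.mem_map.mp hx with ⟨y, hy, rfl⟩
        have := pvScan_pos rest (fun m hm => h m (by simp [hm])) y hy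
        omega
      · exact List.pairwise_map.mpr <| (ih (fun m hm => h m (by simp [hm]))).imp (by omega)

-- bisectLeft is determined by its specification on a sorted list
theorem pvBisect_eq (cum : List Int) (x : Int) (hs : cum.Pairwise (· ≤ ·)) (k : Nat)
    (hk : k ≤ cum.length)
    (h1 : ∀ j (hj : j < cum.length), j < k → cum[j] < x)
    (h2 : ∀ j (hj : j < cum.length), k ≤ j → x ≤ cum[j]) :
    PySem.List.bisectLeft cum x = k := by
  obtain ⟨hb1, hb2, hb3⟩ := PySem.List.bisectLeft_spec cum x hs
  set b := PySem.List.bisectLeft cum x with hbdef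
  rcases Nat.lt_trichotomy b k with hlt | heq | hgt
  · have hblen : b < cum.length := lt_of_lt_of_le hlt hk
    have := h1 b hblen hlt
    have := hb3 b hblen (le_refl b)
    omega
  · exact heq
  · have hklen : k < cum.length := lt_of_lt_of_le hgt hb1
    have := hb2 k hklen hgt
    have := h2 k hklen (le_refl k)
    omega

-- B's cum-building foldl computes pvScan of the (len+1)-list, shifted by the start total
theorem pvFoldl_cum (lines : List (List Char)) (t : Int) (acc : List Int) :
    (lines.foldl
      (fun (st : Int × List Int) line =>
        (st.1 + (line.length : Int) + 1, st.2 ++ [st.1 + (line.length : Int) + 1]))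
      (t, acc)).2
    = acc ++ (pvScan (lines.map (fun l => (l.length : Int) + 1))).map (· + t) := by
  induction lines generalizing t acc with
  | nil => simp [pvScan]
  | cons l rest ih =>
      simp only [List.foldl_cons, List.map_cons, pvScan, List.map_map]
      rw [ih]
      simp only [List.append_assoc, List.singleton_append]
      congr 2
      · omega
      · congr 1
        funext y
        simp only [Function.comp_apply]
        omega

-- linear-scan form of A's loop, over the (len+1)-increments
def pvLin : List Int → Int → Int → Int × Int
  | [], _, _ => (-1, -1)
  | n :: rest, index, line_index =>
      if index > n then pvLin rest (index - n) (line_index + 1)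
      else (line_index, index + 1)

theorem pvLoopA_eq_pvLin (lines : List (List Char)) (index li : Int) :
    pvLoopA lines index li = pvLin (lines.map (fun l => (l.length : Int) + 1)) index li := by
  induction lines generalizing index li with
  | nil => rfl
  | cons l rest ih => simp only [pvLoopA, List.map_cons, pvLin, ih]

-- the 'prev' offset of B at position i'+1 in a cons, in terms of the tail
theorem pvPrev_cons (n : Int) (rest : List Int) (i' : Nat) (h : i' < rest.length + 1) :
    PySem.List.pyGetD (pvScan (n :: rest)) (((i' + 1 : Nat) : Int) - 1) 0
      = (if 0 < i' then PySem.List.pyGetD (pvScan rest) ((i' : Int) - 1) 0 else 0) + n := by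
  have hc : (((i' + 1 : Nat) : Int) - 1) = ((i' : Nat) : Int) := by push_cast; ring
  rw [hc, PySem.List.pyGetD_natCast]
  match i' with
  | 0 => simp [pvScan]
  | Nat.succ j =>
      have hj : j < rest.length := by omega
      have hc2 : (((j + 1 : Nat) : Int) - 1) = ((j : Nat) : Int) := by push_cast; ring
      rw [if_pos (by omega), hc2, PySem.List.pyGetD_natCast]
      simp only [pvScan, List.getD_cons_succ]
      rw [List.getD_eq_getElem _ _ (by simpa [pvScan_length] using hj),
          List.getD_eq_getElem _ _ (by simp [pvScan_length, hj])]
      simp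

-- A's scan equals the prefix-sum-plus-binary-search lookup
theorem pvLin_eq_bisect (lens : List Int) (h : ∀ n ∈ lens, 1 ≤ n) (idx li : Int) :
    pvLin lens idx li =
      (let cum := pvScan lens
       let i := PySem.List.bisectLeft cum idx
       if i = cum.length then (-1, -1)
       else (li + (i : Int),
             idx - (if 0 < i then PySem.List.pyGetD cum ((i : Int) - 1) 0 else 0) + 1)) := by
  induction lens generalizing idx li with
  | nil =>
      simp only [pvLin, pvScan]
      have : PySem.List.bisectLeft ([] : List Int) idx = 0 :=
        pvBisect_eq [] idx (by simp) 0 (by simp) (by simp) (by simp)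
      simp [this]
  | cons n rest ih =>
      have hrest : ∀ m ∈ rest, 1 ≤ m := fun m hm => h m (by simp [hm])
      have hn : 1 ≤ n := h n (by simp)
      have hsorted : (pvScan (n :: rest)).Pairwise (· ≤ ·) := pvScan_sorted _ h
      by_cases hgt : idx > n
      · -- A steps into the next line; bisect lands one past the tail's answer
        obtain ⟨hb1, hb2, hb3⟩ :=
          PySem.List.bisectLeft_spec (pvScan rest) (idx - n) (pvScan_sorted rest hrest)
        set i' := PySem.List.bisectLeft (pvScan rest) (idx - n) with hi'
        have hlen : (pvScan rest).length = rest.length := pvScan_length rest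
        have hbig : PySem.List.bisectLeft (pvScan (n :: rest)) idx = i' + 1 := by
          apply pvBisect_eq _ _ hsorted
          · simp only [pvScan, List.length_cons, List.length_map, pvScan_length]
            omega
          · intro j hj hjk
            match j with
            | 0 => simpa using hgt
            | Nat.succ j' =>
                simp only [pvScan, List.getElem_cons_succ, List.getElem_map]
                have hj' : j' < (pvScan rest).length := by
                  simp only [pvScan, List.length_cons, List.length_map] at hj; omega
                have := hb2 j' hj' (by omega)
                omega
          · intro j hj hjk
            match j with
            | 0 => omega
            | Nat.succ j' =>
                simp only [pvScan, List.getElem_cons_succ, List.getElem_map]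
                have hj' : j' < (pvScan rest).length := by
                  simp only [pvScan, List.length_cons, List.length_map] at hj; omega
                have := hb3 j' hj' (by omega)
                omega
        simp only [pvLin, if_pos hgt, ih hrest, ← hi', hbig]
        simp only [pvScan_length, List.length_cons]
        by_cases hend : i' = rest.length
        · simp [hend]
        · rw [if_neg hend, if_neg (show ¬ (i' + 1 = rest.length + 1) by omega),
              if_pos (show 0 < i' + 1 by omega),
              pvPrev_cons n rest i' (by omega)]
          simp only [Prod.mk.injEq]
          exact ⟨by push_cast; ring, by omega⟩
      · -- A answers in the first line; bisect returns 0
        have hzero : PySem.List.bisectLeft (pvScan (n :: rest)) idx = 0 := by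
          apply pvBisect_eq _ _ hsorted 0 (by simp)
            (by intro j hj hj0; exact absurd hj0 (by omega))
          intro j hj _
          match j with
          | 0 => simp only [pvScan, List.getElem_cons_zero]; omega
          | Nat.succ j' =>
              simp only [pvScan, List.getElem_cons_succ, List.getElem_map]
              have hj' : j' < (pvScan rest).length := by
                simp only [pvScan, List.length_cons, List.length_map] at hj; omega
              have := pvScan_pos rest hrest _ (List.getElem_mem hj')
              omega
        simp only [pvLin, if_neg hgt, hzero]
        rw [if_neg (by simp [pvScan])]
        simp

theorem to_str_column_eq (data : String) (index : Int) :
    to_str_column data index = to_str_column_alt data index := by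
  unfold to_str_column to_str_column_alt
  rw [pvLoopA_eq_pvLin,
      pvLin_eq_bisect _ (by intro m hm; rcases List.mem_map.mp hm with ⟨l, _, rfl⟩; omega)]
  have hid : ((· + (0 : Int))) = id := funext fun x => by simp
  simp only [pvFoldl_cum, List.nil_append, hid, List.map_id]
  split <;> simp [add_comm]

-- ===== VERDICT (by name: the statement is the Claim_ definition above) =====
theorem to_str_column_spec : Claim_equal_to_str_column := by
  intro data index _
  unfold Spec_to_str_column
  exact to_str_column_eq data index
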